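-- pv_equiv track=rewrite | github.com/a063mg/Hardisk | Python/RSA/genkey.py | find_special_number
-- ===== SOURCE A (Python) =====
-- def find_special_number(n):
--     a = list(range(n+1))
--     a[1] = 0
--     lst = []
--
--     i = 2
--     while i <= n:
--         if a[i] != 0:
--             lst.append(a[i])
--         for j in list(range(i, n+1, i)):
--             a[j] = 0
--         i += 1
--
--     del(lst[0])
--
--     for num in lst:
--         if n%num != 0:
--             e = num
--             return e
-- ===== SOURCE B (Python) =====
-- def find_special_number(n):
--     # scan candidates upward; trial-division primality; stop at the first
--     # prime >= 3 that does not divide n (no sieve, no array)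
--     for m in range(3, n + 1):
--         if n % m != 0 and all(m % d != 0 for d in range(2, m)):
--             return m
--     return None
-- ===== Notes on version B (the rewrite author's own statement) =====
-- stated objective: faster
-- what changed: B replaces A's full Sieve-of-Eratosthenes-style array pass (building the whole prime list up to n, then scanning it) by a direct upward scan over candidates 3,4,... with trial-division primality and an early return at the first prime not dividing n.
import Mathlib
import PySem

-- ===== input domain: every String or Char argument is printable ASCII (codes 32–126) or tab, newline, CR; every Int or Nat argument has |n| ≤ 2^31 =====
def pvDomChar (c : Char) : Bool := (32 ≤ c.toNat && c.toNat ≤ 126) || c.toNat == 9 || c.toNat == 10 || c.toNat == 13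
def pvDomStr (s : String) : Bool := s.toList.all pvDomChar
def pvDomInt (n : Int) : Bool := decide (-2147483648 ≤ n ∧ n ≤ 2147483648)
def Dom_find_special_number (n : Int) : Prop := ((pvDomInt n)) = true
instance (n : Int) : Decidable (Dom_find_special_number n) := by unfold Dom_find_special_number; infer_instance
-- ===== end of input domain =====

-- B replaces A's full sieve pass by an early-exit upward scan with trial-division
-- primality; equivalence is proved for n ≥ 2 (A raises IndexError for n ≤ 1).

-- ===== PORT A =====
-- The sieve list `a` is held as `Array Int` (same values, O(1) in-place writes so the
-- port evaluates); reads/writes below are exact for the nonnegative in-range indices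
-- A uses (a[i], i in [2,n]; a[j], j from range(i, n+1, i); len(a) = n+1).
def fsnGetD (a : Array Int) (i : Int) (d : Int) : Int :=
  if h : 0 ≤ i ∧ i.toNat < a.size then a[i.toNat]'h.2 else d

def fsnSet (a : Array Int) (i : Int) (v : Int) : Array Int :=
  if 0 ≤ i then a.setIfInBounds i.toNat v else a

-- while-loop of A: state (a, lst), i counts 2..n; each step reads a[i], appends it
-- if nonzero, then zeroes a[j] for j in range(i, n+1, i).
def fsnLoop (n : Int) (a : Array Int) (lst : List Int) (i : Int) : Array Int × List Int :=
  if _h : i ≤ n then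
    let v := fsnGetD a i 0                     -- a[i]; in range for every reached i when n ≥ 2
    let lst' := if v != 0 then lst ++ [v] else lst
    let a' := (PySem.List.pyRange i (n+1) i).foldl (fun acc j => fsnSet acc j 0) a
    fsnLoop n a' lst' (i+1)
  else (a, lst)
termination_by (n + 1 - i).toNat
decreasing_by omega

def find_special_number (n : Int) : Option Int :=
  let a0 : Array Int := (PySem.List.pyRange 0 (n+1) 1).toArray  -- list(range(n+1))
  let a1 := fsnSet a0 1 0                                 -- a[1] = 0 (IndexError iff n ≤ 0: outside Pre_)
  let lst := (fsnLoop n a1 [] 2).2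
  let lst1 := lst.tail                                    -- del lst[0] (IndexError iff lst = []: outside Pre_)
  lst1.find? (fun num => PySem.Int.mod n num != 0)        -- first num with n % num != 0, else None

-- ===== PORT B =====
def fsnIsPrime (m : Int) : Bool :=
  (PySem.List.pyRange 2 m 1).all (fun d => PySem.Int.mod m d != 0)

def find_special_number_alt (n : Int) : Option Int :=
  (PySem.List.pyRange 3 (n+1) 1).find?
    (fun m => PySem.Int.mod n m != 0 && fsnIsPrime m)

-- ===== PRECONDITION & SPEC =====
-- A raises IndexError for every n ≤ 1 (a[1]=0 for n ≤ 0, del lst[0] for n = 1); it returns on every n ≥ 2.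
def Pre_find_special_number (n : Int) : Prop := 2 ≤ n
instance (n : Int) : Decidable (Pre_find_special_number n) := by unfold Pre_find_special_number; infer_instance
def pvWitness_find_special_number : Int := (4)

def Spec_find_special_number (n : Int) (out : Option Int) : Prop := out = find_special_number_alt n
instance (n : Int) (out : Option Int) : Decidable (Spec_find_special_number n out) := by unfold Spec_find_special_number; infer_instance

-- ===== CLAIM (what is proved, stated in full; the proofs are below) =====
def Claim_equal_find_special_number : Prop := ∀ (n : Int), Dom_find_special_number n → Pre_find_special_number n → Spec_find_special_number n (find_special_number n)

-- ===== LEMMAS AND PROOFS =====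

-- zeroing fold: size is preserved
lemma size_foldl_fsnSet (M : List Int) (a : Array Int) :
    (M.foldl (fun acc j => fsnSet acc j 0) a).size = a.size := by
  induction M generalizing a with
  | nil => rfl
  | cons x M ih =>
    simp only [List.foldl]
    rw [ih]
    rw [fsnSet]; split <;> simp

-- reading back through one element assignment (nonnegative in-range index)
lemma fsnGetD_fsnSet (a : Array Int) (x j : Int) (hx0 : 0 ≤ x) (hj : 0 ≤ j) (hlt : j < (a.size : Int)) :
    fsnGetD (fsnSet a x 0) j 0 = if j = x then 0 else fsnGetD a j 0 := by
  have hjs : j.toNat < a.size := by omega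
  rw [fsnSet, if_pos hx0]
  rw [fsnGetD, dif_pos ⟨hj, by simpa using hjs⟩, fsnGetD, dif_pos ⟨hj, hjs⟩]
  rw [Array.getElem_setIfInBounds]
  by_cases hx : j = x
  · subst hx; simp
  · have : x.toNat ≠ j.toNat := by omega
    simp [this, hx]
  · omega

-- zeroing fold: reading an in-range nonnegative index
lemma fsnGetD_foldl_fsnSet (M : List Int) (a : Array Int) (j : Int)
    (hM : ∀ x ∈ M, 0 ≤ x) (hj : 0 ≤ j) (hlt : j < (a.size : Int)) :
    fsnGetD (M.foldl (fun acc j => fsnSet acc j 0) a) j 0 =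
      if j ∈ M then 0 else fsnGetD a j 0 := by
  induction M generalizing a with
  | nil => simp
  | cons x M ih =>
    have hx0 : 0 ≤ x := hM x (by simp)
    simp only [List.foldl]
    rw [ih (fsnSet a x 0) (fun y hy => hM y (List.mem_cons_of_mem _ hy))
          (by rw [show (fsnSet a x 0).size = a.size by rw [fsnSet]; split <;> simp]; exact hlt)]
    rw [fsnGetD_fsnSet a x j hx0 hj hlt]
    by_cases hxj : j = x
    · subst hxj; by_cases hMe : j ∈ M <;> simp [hMe]
    · by_cases hMe : j ∈ M <;> simp [hMe, hxj]

-- main loop invariant: with a[j] = (j if j has no divisor in [2,i) else 0) for all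
-- remaining j, the loop appends exactly the trial-division primes of [i, n]
lemma fsnLoop_spec (n : Int) : ∀ (k : Nat) (i : Int) (a : Array Int) (lst : List Int),
    (n + 1 - i).toNat = k →
    2 ≤ i →
    a.size = (n+1).toNat →
    (∀ j, i ≤ j → j ≤ n →
      fsnGetD a j 0 =
        if (PySem.List.pyRange 2 i 1).all (fun d => PySem.Int.mod j d != 0) then j else 0) →
    (fsnLoop n a lst i).2 = lst ++ (PySem.List.pyRange i (n+1) 1).filter fsnIsPrime := by
  intro k
  induction k using Nat.strong_induction_on with
  | _ k ih =>
    intro i a lst hk hi hlen ha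
    rw [fsnLoop]
    by_cases h : i ≤ n
    · simp only [h, dif_pos]
      have hn2 : ((n+1).toNat : Int) = n + 1 := by omega
      have hv : fsnGetD a i 0 = if fsnIsPrime i then i else 0 := ha i le_rfl h
      have hM : ∀ x ∈ PySem.List.pyRange i (n+1) i, 0 ≤ x := by
        intro x hx
        have := (PySem.List.mem_pyRange_iff_of_pos (by omega) x).1 hx
        omega
      have hlen' : ((PySem.List.pyRange i (n+1) i).foldl
          (fun acc j => fsnSet acc j 0) a).size = (n+1).toNat := by
        rw [size_foldl_fsnSet]; exact hlen
      have inv' : ∀ j, i + 1 ≤ j → j ≤ n →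
          fsnGetD ((PySem.List.pyRange i (n+1) i).foldl
              (fun acc j => fsnSet acc j 0) a) j 0 =
            if (PySem.List.pyRange 2 (i+1) 1).all (fun d => PySem.Int.mod j d != 0) then j else 0 := by
        intro j hj1 hj2
        rw [fsnGetD_foldl_fsnSet _ _ _ hM (by omega) (by rw [hlen]; omega)]
        rw [PySem.List.pyRange_one_succ_right hi, List.all_append]
        have hmem : j ∈ PySem.List.pyRange i (n+1) i ↔ i ∣ j := by
          rw [PySem.List.mem_pyRange_iff_of_pos (by omega)]
          constructor
          · rintro ⟨-, -, hd⟩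
            have : i ∣ j - i + i := Int.dvd_add hd (dvd_refl i)
            simpa using this
          · intro hd
            exact ⟨by omega, by omega, dvd_sub hd (dvd_refl i)⟩
        by_cases hdvd : i ∣ j
        · have : PySem.Int.mod j i = 0 := (PySem.Int.mod_eq_zero_iff_dvd j i).2 hdvd
          simp [hmem.2 hdvd, this]
        · have hm : PySem.Int.mod j i ≠ 0 := fun hc => hdvd ((PySem.Int.mod_eq_zero_iff_dvd j i).1 hc)
          rw [if_neg (by rw [hmem]; exact hdvd)]
          rw [ha j (by omega) hj2]
          simp [hm]
      have step := ih ((n + 1 - (i+1)).toNat) (by omega) (i+1)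
        ((PySem.List.pyRange i (n+1) i).foldl (fun acc j => fsnSet acc j 0) a)
        (if fsnGetD a i 0 != 0 then lst ++ [fsnGetD a i 0] else lst)
        rfl (by omega) hlen' inv'
      rw [step]
      rw [PySem.List.pyRange_one_cons (by omega : i < n + 1), List.filter_cons]
      by_cases hp : fsnIsPrime i
      · have hne : i ≠ 0 := by omega
        simp [hv, hp, hne]
      · simp [hv, hp]
    · simp only [h, dif_neg, not_false_iff]
      rw [PySem.List.pyRange_one_eq_nil (by omega)]
      simp

lemma find_special_number_eq_alt (n : Int) (hn : 2 ≤ n) :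
    find_special_number n = find_special_number_alt n := by
  unfold find_special_number
  dsimp only
  have hlen0 : ((PySem.List.pyRange 0 (n+1) 1).toArray).size = (n+1).toNat := by
    rw [List.size_toArray, PySem.List.length_pyRange_one]; omega
  have hlen1 : (fsnSet (PySem.List.pyRange 0 (n+1) 1).toArray 1 (0:Int)).size = (n+1).toNat := by
    rw [fsnSet]; split <;> simp [hlen0]
  have inv : ∀ j, (2:Int) ≤ j → j ≤ n →
      fsnGetD (fsnSet (PySem.List.pyRange 0 (n+1) 1).toArray 1 0) j 0 =
        if (PySem.List.pyRange 2 2 1).all (fun d => PySem.Int.mod j d != 0) then j else 0 := by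
    intro j hj1 hj2
    rw [PySem.List.pyRange_one_eq_nil (le_refl 2)]
    simp only [List.all_nil, if_pos]
    rw [fsnGetD_fsnSet _ _ _ (by omega) (by omega) (by rw [hlen0]; omega)]
    rw [if_neg (by omega : ¬ j = 1)]
    rw [fsnGetD, dif_pos ⟨by omega, by rw [hlen0]; omega⟩]
    rw [List.getElem_toArray, PySem.List.getElem_pyRange_one]
    omega
  have hloop := fsnLoop_spec n ((n + 1 - 2).toNat) 2 _ [] rfl (le_refl 2) hlen1 inv
  rw [hloop]
  rw [PySem.List.pyRange_one_cons (by omega : (2:Int) < n + 1), List.filter_cons]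
  have h2 : fsnIsPrime 2 = true := by decide
  rw [h2]
  simp only [if_true, List.nil_append, List.tail_cons]
  rw [List.find?_filter]
  unfold find_special_number_alt
  congr 1
  funext m
  cases PySem.Int.mod n m != 0 <;> cases fsnIsPrime m <;> simp

-- ===== VERDICT (by name: the statement is the Claim_ definition above) =====
theorem find_special_number_spec : Claim_equal_find_special_number := by
  intro n _ hpre
  exact find_special_number_eq_alt n hpre
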